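-- pv_equiv track=rewrite | github.com/afovo/2023-VAST-CHALLENGE | vast_2023_mc1/Summary/全局检测算法&聚类/源码/Interactive_Anomaly_Detection/Data/forFrontEnd/cycleGenerator.py | sort_cycle_data
-- ===== SOURCE A (Python) =====
-- def sort_cycle_data(cycle_data):
--     sorted_dict = {}
--     sorted_items = sorted(cycle_data.items(), key=lambda x: x[1]['count'], reverse=True)
--     rank_counter = 0
--     prev_count = None
--     for key, value in sorted_items:
--         if value['count'] != prev_count:
--             rank_counter += 1
--         value['rank'] = rank_counter
--         sorted_dict[key] = value
--         prev_count = value['count']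
--     return sorted_dict
-- ===== SOURCE B (Python) =====
-- def sort_cycle_data(cycle_data):
--     # Dense rank as an order statistic: an item's rank is 1 + the number of
--     # distinct counts strictly greater than its own, instead of A's stateful
--     # prev_count/rank_counter scan.
--     counts = {v['count'] for v in cycle_data.values()}
--     result = {}
--     for key, value in sorted(cycle_data.items(), key=lambda kv: kv[1]['count'], reverse=True):
--         value['rank'] = 1 + sum(1 for c in counts if c > value['count'])
--         result[key] = value
--     return result
-- ===== Notes on version B (the rewrite author's own statement) =====
-- stated objective: alternative
-- what changed: A assigns dense ranks with a stateful prev_count/rank_counter scan over the sorted items; B computes each item's rank independently as an order statistic (1 + number of distinct counts strictly greater than its own, over the set of counts), with no cross-iteration rank state.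
import Mathlib
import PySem

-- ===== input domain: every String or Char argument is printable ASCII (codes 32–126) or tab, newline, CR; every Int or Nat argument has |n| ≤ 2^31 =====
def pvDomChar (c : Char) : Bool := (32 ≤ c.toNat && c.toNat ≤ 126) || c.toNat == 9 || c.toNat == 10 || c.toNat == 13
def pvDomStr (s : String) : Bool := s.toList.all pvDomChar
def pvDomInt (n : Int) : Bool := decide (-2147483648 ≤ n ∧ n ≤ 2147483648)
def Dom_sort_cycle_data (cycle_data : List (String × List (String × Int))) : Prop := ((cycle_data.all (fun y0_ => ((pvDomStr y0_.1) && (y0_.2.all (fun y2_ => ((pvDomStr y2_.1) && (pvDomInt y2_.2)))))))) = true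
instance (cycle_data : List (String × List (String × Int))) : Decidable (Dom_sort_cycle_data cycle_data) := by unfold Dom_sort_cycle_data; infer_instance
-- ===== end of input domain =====

-- B replaces A's stateful dense-rank scan by computing each rank as an order statistic over the
-- set of distinct counts (alternative decomposition, same return value). Both Pythons mutate the
-- inner value dicts in place (setting 'rank') identically; the equivalence proved is about the
-- return value.

-- ===== PORT A =====
-- the sort key ports value['count'] as getD "count" 0: exact under Pre_ (KeyError inputs are excluded)
def sort_cycle_data (cycle_data : List (String × List (String × Int))) : List (String × List (String × Int)) :=
  let sorted_items := PySem.List.sorted cycle_data (fun x => (PySem.Dict.mk x.2).getD "count" 0) true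
  let final := sorted_items.foldl
    (fun (st : PySem.Dict String (List (String × Int)) × Int × Option Int) kv =>
      let c := (PySem.Dict.mk kv.2).getD "count" 0
      let rank := if some c ≠ st.2.2 then st.2.1 + 1 else st.2.1
      (st.1.insert kv.1 ((PySem.Dict.mk kv.2).insert "rank" rank).items, rank, some c))
    (PySem.Dict.empty, 0, none)
  final.1.items

-- ===== PORT B =====
def sort_cycle_data_alt (cycle_data : List (String × List (String × Int))) : List (String × List (String × Int)) :=
  let counts : PySem.Set Int := PySem.Set.ofList (cycle_data.map (fun kv => (PySem.Dict.mk kv.2).getD "count" 0))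
  let sorted_items := PySem.List.sorted cycle_data (fun kv => (PySem.Dict.mk kv.2).getD "count" 0) true
  (sorted_items.foldl
    (fun (d : PySem.Dict String (List (String × Int))) kv =>
      let c := (PySem.Dict.mk kv.2).getD "count" 0
      let r : Int := 1 + ((counts.filter (fun x => decide (c < x))).length : Int)
      d.insert kv.1 ((PySem.Dict.mk kv.2).insert "rank" r).items)
    PySem.Dict.empty).items

-- ===== PRECONDITION & SPEC =====
-- Pre_ states the dict representation invariant (outer and inner association lists have unique
-- keys, as Python dicts always do) and excludes the inputs where A raises KeyError (some value
-- dict lacking the key 'count').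
def Pre_sort_cycle_data (cycle_data : List (String × List (String × Int))) : Prop :=
  (cycle_data.map Prod.fst).Nodup ∧
  ∀ kv ∈ cycle_data, (kv.2.map Prod.fst).Nodup ∧ "count" ∈ kv.2.map Prod.fst
instance (cycle_data : List (String × List (String × Int))) : Decidable (Pre_sort_cycle_data cycle_data) := by unfold Pre_sort_cycle_data; infer_instance

def pvWitness_sort_cycle_data : (List (String × List (String × Int))) :=
  [("a", [("count", 3)]), ("b", [("count", 1)]), ("c", [("count", 3)])]

def Spec_sort_cycle_data (cycle_data : List (String × List (String × Int))) (out : List (String × List (String × Int))) : Prop := out = sort_cycle_data_alt cycle_data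
instance (cycle_data : List (String × List (String × Int))) (out : List (String × List (String × Int))) : Decidable (Spec_sort_cycle_data cycle_data out) := by unfold Spec_sort_cycle_data; infer_instance

-- ===== CLAIM (what is proved, stated in full; the proofs are below) =====
def Claim_equal_sort_cycle_data : Prop := ∀ (cycle_data : List (String × List (String × Int))), Dom_sort_cycle_data cycle_data → Pre_sort_cycle_data cycle_data → Spec_sort_cycle_data cycle_data (sort_cycle_data cycle_data)

-- ===== LEMMAS AND PROOFS =====

-- the count of an item, as both ports read it
def pvCnt (kv : String × List (String × Int)) : Int := (PySem.Dict.mk kv.2).getD "count" 0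

-- A's loop body and B's loop body, named for the induction
def pvStepA (st : PySem.Dict String (List (String × Int)) × Int × Option Int)
    (kv : String × List (String × Int)) :
    PySem.Dict String (List (String × Int)) × Int × Option Int :=
  let c := pvCnt kv
  let rank := if some c ≠ st.2.2 then st.2.1 + 1 else st.2.1
  (st.1.insert kv.1 ((PySem.Dict.mk kv.2).insert "rank" rank).items, rank, some c)

def pvStepB (counts : List Int) (d : PySem.Dict String (List (String × Int)))
    (kv : String × List (String × Int)) : PySem.Dict String (List (String × Int)) :=
  d.insert kv.1 ((PySem.Dict.mk kv.2).insert "rank"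
    (1 + ((counts.filter (fun x => decide (pvCnt kv < x))).length : Int))).items

lemma pv_filter_len_succ (counts : List Int) (hnd : counts.Nodup) (c p : Int)
    (hcp : c < p) (hp : p ∈ counts)
    (hgap : ∀ dd ∈ counts, ¬ (c < dd ∧ dd < p)) :
    ((counts.filter (fun x => decide (c < x))).length : Int)
      = ((counts.filter (fun x => decide (p < x))).length : Int) + 1 := by
  have hperm : (counts.filter (fun x => decide (c < x))).Perm
      (p :: counts.filter (fun x => decide (p < x))) := by
    rw [List.perm_ext_iff_of_nodup (hnd.filter _)]
    · intro a
      simp only [List.mem_filter, List.mem_cons, decide_eq_true_eq]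
      constructor
      · rintro ⟨ha, hca⟩
        rcases lt_trichotomy a p with h | h | h
        · exact absurd ⟨hca, h⟩ (hgap a ha)
        · exact Or.inl h
        · exact Or.inr ⟨ha, h⟩
      · rintro (rfl | ⟨ha, hpa⟩)
        · exact ⟨hp, hcp⟩
        · exact ⟨ha, lt_trans hcp hpa⟩
    · exact List.Nodup.cons (by simp) (hnd.filter _)
  have := hperm.length_eq
  simp only [List.length_cons] at this
  omega

-- main invariant: over a descending (by count) suffix xs, A's stateful scan and B's
-- order-statistic rank build the same dictionary
lemma pv_scan_eq (counts : List Int) (hnd : counts.Nodup) :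
    ∀ (xs : List (String × List (String × Int))) (d : PySem.Dict String (List (String × Int)))
      (r p : Int),
      xs.Pairwise (fun a b => pvCnt b ≤ pvCnt a) →
      (∀ kv ∈ xs, pvCnt kv ≤ p) →
      p ∈ counts →
      r = 1 + ((counts.filter (fun x => decide (p < x))).length : Int) →
      (∀ kv ∈ xs, pvCnt kv ∈ counts) →
      (∀ dd ∈ counts, p ≤ dd ∨ ∃ kv ∈ xs, pvCnt kv = dd) →
      (xs.foldl pvStepA (d, r, some p)).1 = xs.foldl (pvStepB counts) d := by
  intro xs
  induction xs with
  | nil => intro d r p _ _ _ _ _ _; rfl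
  | cons x t ih =>
    intro d r p hpair hle hp hr hcnts hcover
    have hxc : pvCnt x ≤ p := hle x (List.mem_cons_self)
    have hhead : ∀ kv ∈ t, pvCnt kv ≤ pvCnt x := fun kv hkv => (List.pairwise_cons.mp hpair).1 kv hkv
    by_cases hc : pvCnt x = p
    · -- same count as previous: rank stays r
      subst hc
      have hstep : pvStepA (d, r, some (pvCnt x)) x
          = (pvStepB counts d x, r, some (pvCnt x)) := by
        simp [pvStepA, pvStepB, ← hr]
      simp only [List.foldl_cons]
      rw [hstep]
      refine ih _ _ _ (List.pairwise_cons.mp hpair).2 hhead hp hr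
        (fun kv hkv => hcnts kv (List.mem_cons_of_mem _ hkv)) ?_
      intro dd hdd
      rcases hcover dd hdd with h | ⟨kv, hkv, hkvc⟩
      · exact Or.inl h
      · rcases List.mem_cons.mp hkv with rfl | hkv'
        · exact Or.inl (le_of_eq hkvc)
        · exact Or.inr ⟨kv, hkv', hkvc⟩
    · -- strictly smaller count: rank increments, and it equals B's order statistic
      have hlt : pvCnt x < p := lt_of_le_of_ne hxc hc
      have hgap : ∀ dd ∈ counts, ¬ (pvCnt x < dd ∧ dd < p) := by
        rintro dd hdd ⟨h1, h2⟩
        rcases hcover dd hdd with h | ⟨kv, hkv, hkvc⟩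
        · omega
        · rcases List.mem_cons.mp hkv with rfl | hkv'
          · omega
          · have := hhead kv hkv'; omega
      have hflt := pv_filter_len_succ counts hnd (pvCnt x) p hlt hp hgap
      have hrB : r + 1 = 1 + ((counts.filter (fun y => decide (pvCnt x < y))).length : Int) := by
        omega
      have hstep : pvStepA (d, r, some p) x
          = (pvStepB counts d x, r + 1, some (pvCnt x)) := by
        simp [pvStepA, pvStepB, hc, ← hrB]
      simp only [List.foldl_cons]
      rw [hstep]
      refine ih _ _ _ (List.pairwise_cons.mp hpair).2 hhead
        (hcnts x (List.mem_cons_self)) hrB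
        (fun kv hkv => hcnts kv (List.mem_cons_of_mem _ hkv)) ?_
      intro dd hdd
      rcases hcover dd hdd with h | ⟨kv, hkv, hkvc⟩
      · left; omega
      · rcases List.mem_cons.mp hkv with rfl | hkv'
        · exact Or.inl (le_of_eq hkvc)
        · exact Or.inr ⟨kv, hkv', hkvc⟩

-- ===== VERDICT (by name: the statement is the Claim_ definition above) =====
theorem sort_cycle_data_spec : Claim_equal_sort_cycle_data := by
  intro cycle_data _ _
  unfold Spec_sort_cycle_data sort_cycle_data sort_cycle_data_alt
  set counts : List Int := PySem.Set.ofList (cycle_data.map pvCnt) with hcountsdef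
  have hnd : counts.Nodup := PySem.Set.nodup_ofList _
  have hmemc : ∀ dd, dd ∈ counts ↔ ∃ kv ∈ cycle_data, pvCnt kv = dd := by
    intro dd
    rw [hcountsdef, PySem.Set.mem_ofList, List.mem_map]
  show (List.foldl pvStepA (PySem.Dict.empty, 0, none) (PySem.List.sorted cycle_data pvCnt true)).1.items
      = (List.foldl (pvStepB counts) PySem.Dict.empty (PySem.List.sorted cycle_data pvCnt true)).items
  congr 1
  rcases hS : PySem.List.sorted cycle_data pvCnt true with _ | ⟨x, t⟩
  · rfl
  · have hmax : ∀ y ∈ cycle_data, pvCnt y ≤ pvCnt x :=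
      PySem.List.key_head_sorted_rev_ge cycle_data pvCnt hS
    have hmemsorted : ∀ kv, kv ∈ (x :: t) ↔ kv ∈ cycle_data := by
      intro kv; rw [← hS, PySem.List.mem_sorted]
    have hxmem : x ∈ cycle_data := (hmemsorted x).mp (List.mem_cons_self)
    have hpair : (x :: t).Pairwise (fun a b => pvCnt b ≤ pvCnt a) := by
      rw [← hS]; exact PySem.List.sorted_pairwise_rev cycle_data pvCnt
    have hfilter0 : counts.filter (fun y => decide (pvCnt x < y)) = [] := by
      rw [List.filter_eq_nil_iff]
      intro dd hdd
      rcases (hmemc dd).mp hdd with ⟨kv, hkv, rfl⟩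
      simp only [decide_eq_true_eq, not_lt]
      exact hmax kv hkv
    simp only [List.foldl_cons]
    have hstep : pvStepA (PySem.Dict.empty, 0, none) x
        = (pvStepB counts PySem.Dict.empty x, 1, some (pvCnt x)) := by
      simp [pvStepA, pvStepB, hfilter0]
    rw [hstep]
    refine pv_scan_eq counts hnd t _ 1 (pvCnt x) (List.pairwise_cons.mp hpair).2
      (fun kv hkv => (List.pairwise_cons.mp hpair).1 kv hkv)
      ((hmemc (pvCnt x)).mpr ⟨x, hxmem, rfl⟩)
      (by rw [hfilter0]; simp)
      (fun kv hkv => (hmemc (pvCnt kv)).mpr ⟨kv, (hmemsorted kv).mp (List.mem_cons_of_mem _ hkv), rfl⟩) ?_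
    intro dd hdd
    rcases (hmemc dd).mp hdd with ⟨kv, hkv, rfl⟩
    rcases List.mem_cons.mp ((hmemsorted kv).mpr hkv) with rfl | hkv'
    · exact Or.inl (le_refl _)
    · exact Or.inr ⟨kv, hkv', rfl⟩
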